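-- pv_equiv track=rewrite | github.com/IBM/regression-transformer | terminator/selfies.py | get_symbols_from_n
-- ===== SOURCE A (Python) =====
-- from typing import Dict, Iterable, List, Optional, Set, Tuple, Union
--
-- _index_alphabet = [
--     '[C]',
--     '[Ring1]',
--     '[Ring2]',
--     '[Branch1_1]',
--     '[Branch1_2]',
--     '[Branch1_3]',
--     '[Branch2_1]',
--     '[Branch2_2]',
--     '[Branch2_3]',
--     '[O]',
--     '[N]',
--     '[=N]',
--     '[=C]',
--     '[#C]',
--     '[S]',
--     '[P]',
-- ]
--
-- def get_symbols_from_n(n: int) -> List[str]: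
--     """Converts an integer n into a list of SELFIES symbols that, if
--     passed into ``get_n_from_symbols`` in that order, would have produced n.
--     :param n: an integer from 0 to 4095 inclusive.
--     :return: a list of SELFIES symbols representing n in base
--         ``len(_alphabet_code)``.
--     """
--
--     if n == 0:
--         return [_index_alphabet[0]]
--
--     symbols = []
--     base = len(_index_alphabet)
--     while n:
--         symbols.append(_index_alphabet[n % base])
--         n //= base
--     return symbols[::-1]
-- ===== SOURCE B (Python) =====
-- _index_alphabet = [
--     '[C]',
--     '[Ring1]',
--     '[Ring2]',
--     '[Branch1_1]',
--     '[Branch1_2]',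
--     '[Branch1_3]',
--     '[Branch2_1]',
--     '[Branch2_2]',
--     '[Branch2_3]',
--     '[O]',
--     '[N]',
--     '[=N]',
--     '[=C]',
--     '[#C]',
--     '[S]',
--     '[P]',
-- ]
--
-- def get_symbols_from_n(n: int):
--     base = len(_index_alphabet)
--     if 0 <= n < base:
--         return [_index_alphabet[n]]
--     return get_symbols_from_n(n // base) + [_index_alphabet[n % base]]
-- ===== Notes on version B (the rewrite author's own statement) =====
-- stated objective: simpler
-- what changed: Replaced the append-then-reverse while loop and its separate zero branch by a direct recursion that emits digits most-significant-first, removing both the reversal and the special case.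
import Mathlib
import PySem

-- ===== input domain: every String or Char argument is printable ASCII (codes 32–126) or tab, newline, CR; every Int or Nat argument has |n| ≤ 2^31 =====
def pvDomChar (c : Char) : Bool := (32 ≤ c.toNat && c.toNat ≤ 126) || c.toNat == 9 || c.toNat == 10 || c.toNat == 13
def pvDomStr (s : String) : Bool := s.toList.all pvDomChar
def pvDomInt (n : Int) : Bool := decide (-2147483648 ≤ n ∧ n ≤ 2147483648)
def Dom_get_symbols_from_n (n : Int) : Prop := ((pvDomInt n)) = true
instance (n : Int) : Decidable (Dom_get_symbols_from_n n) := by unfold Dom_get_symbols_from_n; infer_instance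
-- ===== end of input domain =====

-- B replaces A's append-then-reverse while loop (and its separate zero branch) by a direct
-- most-significant-digit-first recursion; same O(log n) cost, shorter code.

-- ===== PORT A =====
def pvAlphabet : List String :=
  ["[C]", "[Ring1]", "[Ring2]", "[Branch1_1]", "[Branch1_2]", "[Branch1_3]",
   "[Branch2_1]", "[Branch2_2]", "[Branch2_3]", "[O]", "[N]", "[=N]",
   "[=C]", "[#C]", "[S]", "[P]"]

-- A's 'while n:' loop; the guard 'n ≤ 0' (instead of Python's 'n ≠ 0') only makes the
-- recursion total — Python diverges for n < 0, which Pre_ excludes.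
def pvLoopA (n : Int) (symbols : List String) : List String :=
  if _h : n ≤ 0 then symbols
  else pvLoopA (PySem.Int.floordiv n 16)
        (symbols ++ [PySem.List.pyGetD pvAlphabet (PySem.Int.mod n 16) ""])
termination_by n.toNat
decreasing_by
  rw [PySem.Int.floordiv_eq_ediv_of_pos (by omega)]
  omega

def get_symbols_from_n (n : Int) : List String :=
  if n = 0 then [PySem.List.pyGetD pvAlphabet 0 ""]
  else (PySem.List.slice? (pvLoopA n []) none none (-1)).getD []   -- symbols[::-1]

-- ===== PORT B =====
-- recursive, most-significant digit first; the 'n ≤ 0' fallback only makes it total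
-- (Python B diverges for n < 0, outside Pre_)
def get_symbols_from_n_alt (n : Int) : List String :=
  if 0 ≤ n ∧ n < 16 then [PySem.List.pyGetD pvAlphabet n ""]
  else if _h : n ≤ 0 then []
  else get_symbols_from_n_alt (PySem.Int.floordiv n 16)
        ++ [PySem.List.pyGetD pvAlphabet (PySem.Int.mod n 16) ""]
termination_by n.toNat
decreasing_by
  rw [PySem.Int.floordiv_eq_ediv_of_pos (by omega)]
  omega

-- ===== PRECONDITION & SPEC =====
-- Pre_ excludes n < 0, on which Python A's 'while n:' loop never terminates (n //= 16 stalls at -1).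
def Pre_get_symbols_from_n (n : Int) : Prop := 0 ≤ n
instance (n : Int) : Decidable (Pre_get_symbols_from_n n) := by unfold Pre_get_symbols_from_n; infer_instance
def pvWitness_get_symbols_from_n : Int := (37)

def Spec_get_symbols_from_n (n : Int) (out : List String) : Prop := out = get_symbols_from_n_alt n
instance (n : Int) (out : List String) : Decidable (Spec_get_symbols_from_n n out) := by unfold Spec_get_symbols_from_n; infer_instance

-- ===== CLAIM (what is proved, stated in full; the proofs are below) =====
def Claim_equal_get_symbols_from_n : Prop := ∀ (n : Int), Dom_get_symbols_from_n n → Pre_get_symbols_from_n n → Spec_get_symbols_from_n n (get_symbols_from_n n)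

-- ===== LEMMAS AND PROOFS =====

-- loop invariant: for positive n, A's loop output reversed is B's digit list appended after acc reversed
lemma pvLoopA_eq (k : Nat) : ∀ (n : Int) (acc : List String), n.toNat ≤ k → 0 < n →
    pvLoopA n acc = acc ++ (get_symbols_from_n_alt n).reverse := by
  induction k with
  | zero => intro n acc hk hn; omega
  | succ k ih =>
    intro n acc hk hn
    rw [pvLoopA]
    simp only [dif_neg (by omega : ¬ n ≤ 0)]
    have hfd : PySem.Int.floordiv n 16 = n / 16 :=
      PySem.Int.floordiv_eq_ediv_of_pos (by omega)
    by_cases h16 : n < 16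
    · -- last digit: n // 16 = 0, n % 16 = n
      have h0 : PySem.Int.floordiv n 16 = 0 := by omega
      have hm : PySem.Int.mod n 16 = n := by
        rw [PySem.Int.mod_eq_emod_of_pos (by omega)]; omega
      rw [h0, pvLoopA]
      simp only [dif_pos (le_refl (0 : Int))]
      rw [get_symbols_from_n_alt]
      simp only [if_pos (⟨le_of_lt hn, h16⟩ : 0 ≤ n ∧ n < 16), hm, List.reverse_singleton]
    · -- n ≥ 16: recurse on n // 16
      have hrec := ih (PySem.Int.floordiv n 16)
        (acc ++ [PySem.List.pyGetD pvAlphabet (PySem.Int.mod n 16) ""])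
        (by omega) (by omega)
      rw [hrec]
      conv_rhs => rw [get_symbols_from_n_alt]
      simp only [if_neg (by omega : ¬ (0 ≤ n ∧ n < 16)),
        dif_neg (by omega : ¬ n ≤ 0)]
      simp [List.append_assoc]

-- ===== VERDICT (by name: the statement is the Claim_ definition above) =====
theorem get_symbols_from_n_spec : Claim_equal_get_symbols_from_n := by
  intro n _hd hpre
  unfold Spec_get_symbols_from_n
  unfold get_symbols_from_n
  by_cases h0 : n = 0
  · subst h0
    rw [get_symbols_from_n_alt]
    norm_num
  · simp only [if_neg h0]
    rw [PySem.List.slice?_none_none_neg_one, Option.getD_some]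
    rw [pvLoopA_eq n.toNat n [] (le_refl _) (by unfold Pre_get_symbols_from_n at hpre; omega)]
    simp
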